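-- pv_equiv track=rewrite | github.com/shalma15/Praktikum-ADP | TugasModul8.py | pecah_manual
-- ===== SOURCE A (Python) =====
-- def pecah_manual(teks):
--     hasil = []
--     kata = ""
--     for huruf in teks:
--         if huruf == ",":
--             hasil.append(kata)
--             kata = ""
--         elif huruf == "\n":
--             continue
--         else:
--             kata += huruf
--     hasil.append(kata)
--     return hasil
-- ===== SOURCE B (Python) =====
-- def pecah_manual(teks):
--     return teks.replace("\n", "").split(",")
-- ===== Notes on version B (the rewrite author's own statement) =====
-- stated objective: idiomatic
-- what changed: Replaced the manual per-character scan with a token buffer by two whole-string builtin passes: strip newlines with str.replace, then comma-split with str.split.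
import Mathlib
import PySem

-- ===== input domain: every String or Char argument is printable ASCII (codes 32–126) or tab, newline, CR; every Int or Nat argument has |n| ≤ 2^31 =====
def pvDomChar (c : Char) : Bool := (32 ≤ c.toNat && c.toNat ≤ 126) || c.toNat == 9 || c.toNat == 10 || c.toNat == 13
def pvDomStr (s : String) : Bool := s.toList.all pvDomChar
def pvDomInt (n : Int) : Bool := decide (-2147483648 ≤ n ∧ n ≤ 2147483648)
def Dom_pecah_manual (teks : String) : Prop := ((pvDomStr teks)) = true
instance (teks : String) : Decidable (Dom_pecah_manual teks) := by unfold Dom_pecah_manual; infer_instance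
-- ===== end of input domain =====

-- B replaces A's manual per-character scan (token buffer + result list) by two builtin
-- whole-string passes: delete newlines with replace, then split on commas (idiomatic; measurably faster via C builtins).

-- ===== PORT A =====
-- Literal port of A's loop: the accumulator `kata` is kept as List Char (Python str
-- concatenation `kata += huruf` = append one char); the final strings are produced at the end.
def pvStepA (st : List (List Char) × List Char) (huruf : Char) : List (List Char) × List Char :=
  if huruf = ',' then (st.1 ++ [st.2], [])
  else if huruf = '\n' then st
  else (st.1, st.2 ++ [huruf])

def pecah_manual (teks : String) : List String :=
  let p := teks.toList.foldl pvStepA ([], [])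
  (p.1 ++ [p.2]).map String.ofList

-- ===== PORT B =====
-- teks.replace("\n", "").split(","): split with a nonempty separator is PySem.Chars.splitOn.
def pecah_manual_alt (teks : String) : List String :=
  (PySem.Chars.splitOn (PySem.Str.replace teks "\n" "").toList [',']).map String.ofList

-- ===== PRECONDITION & SPEC =====
def Spec_pecah_manual (teks : String) (out : List String) : Prop := out = pecah_manual_alt teks
instance (teks : String) (out : List String) : Decidable (Spec_pecah_manual teks out) := by unfold Spec_pecah_manual; infer_instance

-- ===== CLAIM (what is proved, stated in full; the proofs are below) =====
def Claim_equal_pecah_manual : Prop := ∀ (teks : String), Dom_pecah_manual teks → Spec_pecah_manual teks (pecah_manual teks)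

-- ===== LEMMAS AND PROOFS =====

-- Recursive characterisation of splitting a (newline-free) char list on ','.
def pvSplit : List Char → List Char → List (List Char)
  | [], cur => [cur]
  | c :: t, cur => if c = ',' then cur :: pvSplit t [] else pvSplit t (cur ++ [c])

-- replace.go with old = ['\n'], new = [] is filtering out newlines.
theorem pv_replace_go (fuel : Nat) : ∀ (l acc : List Char), l.length ≤ fuel →
    PySem.Chars.replace.go ['\n'] [] fuel l acc = acc.reverse ++ l.filter (· ≠ '\n') := by
  induction fuel with
  | zero =>
    intro l acc h
    have : l = [] := List.eq_nil_of_length_eq_zero (Nat.le_zero.mp h)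
    subst this; simp [PySem.Chars.replace.go]
  | succ n ih =>
    intro l acc h
    cases l with
    | nil => simp [PySem.Chars.replace.go]
    | cons c t =>
      by_cases hc : c = '\n'
      · subst hc
        have hp : List.isPrefixOf ['\n'] ('\n' :: t) = true := by
          simp [List.isPrefixOf]
        simp only [PySem.Chars.replace.go, hp, if_true]
        rw [show List.drop (['\n'] : List Char).length ('\n' :: t) = t by simp]
        rw [ih t _ (by simpa using Nat.le_of_succ_le_succ h)]
        simp
      · have hp : List.isPrefixOf ['\n'] (c :: t) = false := by
          simp [List.isPrefixOf]
          exact fun hh => absurd hh.symm hc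
        simp only [PySem.Chars.replace.go, hp]
        rw [if_neg (by simp)]
        rw [ih t (c :: acc) (by simpa using Nat.le_of_succ_le_succ h)]
        simp [hc]

theorem pv_replace_eq_filter (cs : List Char) :
    PySem.Chars.replace cs ['\n'] [] = cs.filter (· ≠ '\n') := by
  have : ¬ (['\n'] : List Char).isEmpty = true := by simp
  simp only [PySem.Chars.replace, this]
  rw [if_neg (by simp)]
  simpa using pv_replace_go cs.length cs [] le_rfl

-- splitOn.go with sep = [','] computes pvSplit.
theorem pv_splitOn_go (fuel : Nat) : ∀ (l cur : List Char) (acc : List (List Char)),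
    l.length ≤ fuel →
    PySem.Chars.splitOn.go [','] fuel l cur acc = acc.reverse ++ pvSplit l cur.reverse := by
  induction fuel with
  | zero =>
    intro l cur acc h
    have : l = [] := List.eq_nil_of_length_eq_zero (Nat.le_zero.mp h)
    subst this; simp [PySem.Chars.splitOn.go, pvSplit]
  | succ n ih =>
    intro l cur acc h
    cases l with
    | nil => simp [PySem.Chars.splitOn.go, pvSplit]
    | cons c t =>
      by_cases hc : c = ','
      · subst hc
        have hp : List.isPrefixOf [','] (',' :: t) = true := by simp [List.isPrefixOf]
        simp only [PySem.Chars.splitOn.go, hp, if_true]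
        rw [show List.drop ([','] : List Char).length (',' :: t) = t by simp]
        rw [ih t [] (cur.reverse :: acc) (by simpa using Nat.le_of_succ_le_succ h)]
        simp [pvSplit]
      · have hp : List.isPrefixOf [','] (c :: t) = false := by
          simp [List.isPrefixOf]
          exact fun hh => absurd hh.symm hc
        simp only [PySem.Chars.splitOn.go, hp]
        rw [if_neg (by simp)]
        rw [ih t (c :: cur) acc (by simpa using Nat.le_of_succ_le_succ h)]
        simp [pvSplit, hc]

theorem pv_splitOn_eq (cs : List Char) :
    PySem.Chars.splitOn cs [','] = pvSplit cs [] := by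
  simpa using pv_splitOn_go (cs.length + 1) cs [] [] (Nat.le_succ _)

-- A's fold produces pvSplit of the newline-filtered input.
theorem pv_foldA (cs : List Char) : ∀ (hasil : List (List Char)) (kata : List Char),
    (cs.foldl pvStepA (hasil, kata)).1 ++ [(cs.foldl pvStepA (hasil, kata)).2]
      = hasil ++ pvSplit (cs.filter (· ≠ '\n')) kata := by
  induction cs with
  | nil => intro hasil kata; simp [pvSplit]
  | cons c t ih =>
    intro hasil kata
    by_cases hc : c = ','
    · subst hc
      simp only [List.foldl_cons]
      rw [show pvStepA (hasil, kata) ',' = (hasil ++ [kata], []) from by simp [pvStepA]]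
      rw [List.filter_cons_of_pos (by decide)]
      rw [ih (hasil ++ [kata]) []]
      simp [pvSplit]
    · by_cases hn : c = '\n'
      · subst hn
        simp only [List.foldl_cons]
        rw [show pvStepA (hasil, kata) '\n' = (hasil, kata) from by simp [pvStepA]]
        rw [List.filter_cons_of_neg (by simp)]
        exact ih hasil kata
      · simp only [List.foldl_cons]
        rw [show pvStepA (hasil, kata) c = (hasil, kata ++ [c]) from by simp [pvStepA, hc, hn]]
        rw [List.filter_cons_of_pos (by simp [hn])]
        rw [ih hasil (kata ++ [c])]
        simp [pvSplit, hc]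

-- ===== VERDICT (by name: the statement is the Claim_ definition above) =====
theorem pecah_manual_spec : Claim_equal_pecah_manual := by
  intro teks _
  unfold Spec_pecah_manual
  rw [show pecah_manual teks
        = ((teks.toList.foldl pvStepA ([], [])).1
            ++ [(teks.toList.foldl pvStepA ([], [])).2]).map String.ofList from rfl]
  unfold pecah_manual_alt
  rw [PySem.Str.toList_replace]
  rw [show ("\n" : String).toList = ['\n'] from rfl,
      show ("" : String).toList = [] from rfl]
  rw [pv_replace_eq_filter, pv_splitOn_eq]
  rw [pv_foldA teks.toList [] []]
  simp
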